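-- pv_equiv track=rewrite | github.com/VaariDesign/License-Plate-Recognition | licenceplate.py | filtered_text
-- ===== SOURCE A (Python) =====
-- def filtered_text(text):
--     """
--     Filters mistakes from reading extra marks etc...
--     Made for Finnish Licence plates
--     :param text: String
--     :return: Modified text
--     """
--     ftext = ''
--     firstnum = True
--     for letter in text:
--         if letter.isalpha():
--             ftext += letter.capitalize()
--
--         elif letter.isnumeric():
--             if firstnum:
--                 ftext += '-'
--                 firstnum = False
--             ftext += letter
--     return ftext
-- ===== SOURCE B (Python) =====
-- def filtered_text(text):
--     """
--     Filter-then-splice reimplementation: build the kept/capitalized sequence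
--     in one comprehension, then insert '-' before its first numeric character.
--     """
--     kept = [c.capitalize() if c.isalpha() else c for c in text
--             if c.isalpha() or c.isnumeric()]
--     for i, c in enumerate(kept):
--         if c.isnumeric():
--             return ''.join(kept[:i]) + '-' + ''.join(kept[i:])
--     return ''.join(kept)
-- ===== Notes on version B (the rewrite author's own statement) =====
-- stated objective: alternative
-- what changed: Replaces A's single-pass firstnum-flag loop by a filter-map pass that builds the kept/capitalized sequence first, then finds the first numeric character's index and splices a dash in before it.
import Mathlib
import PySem

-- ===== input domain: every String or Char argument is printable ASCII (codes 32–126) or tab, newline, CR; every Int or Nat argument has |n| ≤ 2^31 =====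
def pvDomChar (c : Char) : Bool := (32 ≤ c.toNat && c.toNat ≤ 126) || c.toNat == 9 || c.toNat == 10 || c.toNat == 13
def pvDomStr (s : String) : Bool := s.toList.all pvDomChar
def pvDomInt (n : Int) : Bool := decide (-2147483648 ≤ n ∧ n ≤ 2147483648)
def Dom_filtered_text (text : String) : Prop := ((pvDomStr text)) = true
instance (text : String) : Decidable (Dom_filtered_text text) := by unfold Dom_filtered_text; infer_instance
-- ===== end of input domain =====

-- B restructures A as filter-map, then find-first-digit, then splice a '-' in.
-- On the ASCII domain Python's str.isnumeric coincides with isdigit and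
-- str.capitalize on a single character coincides with upperChar (exact there).

-- ===== PORT A =====
-- state = (ftext, firstnum); one step of A's loop body
def pvStepA (st : List Char × Bool) (letter : Char) : List Char × Bool :=
  if PySem.Chars.isalpha letter then (st.1 ++ [PySem.Chars.upperChar letter], st.2)
  else if PySem.Chars.isdigit letter then
    if st.2 then (st.1 ++ ['-', letter], false) else (st.1 ++ [letter], st.2)
  else st

def filtered_text (text : String) : String :=
  String.ofList ((text.toList.foldl pvStepA ([], true)).1)

-- ===== PORT B =====
-- the comprehension: keep letters capitalized and digits, drop the rest
def pvKeep (c : Char) : Option Char :=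
  if PySem.Chars.isalpha c then some (PySem.Chars.upperChar c)
  else if PySem.Chars.isdigit c then some c
  else none

def filtered_text_alt (text : String) : String :=
  let kept := text.toList.filterMap pvKeep
  match kept.findIdx? PySem.Chars.isdigit with
  | some i => String.ofList (kept.take i ++ '-' :: kept.drop i)
  | none => String.ofList kept

-- ===== PRECONDITION & SPEC =====
def Spec_filtered_text (text : String) (out : String) : Prop := out = filtered_text_alt text
instance (text : String) (out : String) : Decidable (Spec_filtered_text text out) := by unfold Spec_filtered_text; infer_instance

-- ===== CLAIM (what is proved, stated in full; the proofs are below) =====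
def Claim_equal_filtered_text : Prop := ∀ (text : String), Dom_filtered_text text → Spec_filtered_text text (filtered_text text)

-- ===== LEMMAS AND PROOFS =====

theorem pv_upper_toNat (c : Char) (h : PySem.Chars.islower c = true) :
    (PySem.Chars.upperChar c).toNat = c.toNat - 32 := by
  simp only [PySem.Chars.upperChar, h, if_true]
  simp only [PySem.Chars.islower, Bool.and_eq_true, decide_eq_true_eq, Char.le_def] at h
  have h1 : 97 ≤ c.toNat := by exact_mod_cast h.1
  have h2 : c.toNat ≤ 122 := by exact_mod_cast h.2
  rw [Char.toNat_ofNat, if_pos]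
  exact Or.inl (by omega)

theorem pv_isdigit_iff (c : Char) : PySem.Chars.isdigit c = true ↔ (48 ≤ c.toNat ∧ c.toNat ≤ 57) := by
  simp only [PySem.Chars.isdigit, Bool.and_eq_true, decide_eq_true_eq, Char.le_def]
  constructor <;> intro ⟨a, b⟩ <;> exact ⟨by exact_mod_cast a, by exact_mod_cast b⟩

-- a kept letter is never a digit, so it cannot trigger the dash
theorem pv_alpha_upper_not_digit (c : Char) (h : PySem.Chars.isalpha c = true) :
    PySem.Chars.isdigit (PySem.Chars.upperChar c) = false := by
  simp only [PySem.Chars.isalpha, Bool.or_eq_true] at h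
  rcases h with h | h
  · have hnl : PySem.Chars.islower c = false := by
      simp only [PySem.Chars.isupper, Bool.and_eq_true, decide_eq_true_eq, Char.le_def] at h
      have h1 : 65 ≤ c.toNat := by exact_mod_cast h.1
      have h2 : c.toNat ≤ 90 := by exact_mod_cast h.2
      by_contra hc
      simp only [Bool.not_eq_false, PySem.Chars.islower, Bool.and_eq_true, decide_eq_true_eq,
        Char.le_def] at hc
      have : 97 ≤ c.toNat := by exact_mod_cast hc.1
      omega
    rw [Bool.eq_false_iff]; intro hd
    rw [pv_isdigit_iff] at hd
    simp only [PySem.Chars.upperChar, hnl, Bool.false_eq_true, if_false] at hd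
    simp only [PySem.Chars.isupper, Bool.and_eq_true, decide_eq_true_eq, Char.le_def] at h
    have h1 : 65 ≤ c.toNat := by exact_mod_cast h.1
    omega
  · rw [Bool.eq_false_iff]; intro hd
    rw [pv_isdigit_iff, pv_upper_toNat c h] at hd
    simp only [PySem.Chars.islower, Bool.and_eq_true, decide_eq_true_eq, Char.le_def] at h
    have h1 : 97 ≤ c.toNat := by exact_mod_cast h.1
    omega

-- B's splice as a function of the filtered list
def pvDash (f : List Char) : List Char :=
  match f.findIdx? PySem.Chars.isdigit with
  | some i => f.take i ++ '-' :: f.drop i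
  | none => f

-- after the first digit (firstnum = False) the loop is a plain filter-map
theorem pv_loop_false (cs : List Char) (acc : List Char) :
    cs.foldl pvStepA (acc, false) = (acc ++ cs.filterMap pvKeep, false) := by
  induction cs generalizing acc with
  | nil => simp
  | cons c cs ih =>
    by_cases ha : PySem.Chars.isalpha c = true
    · simp [pvStepA, pvKeep, ha, ih]
    · by_cases hd : PySem.Chars.isdigit c = true
      · simp [pvStepA, pvKeep, ha, hd, ih]
      · simp [pvStepA, pvKeep, ha, hd, ih]

-- while firstnum = True the loop computes the dashed filtered list
theorem pv_loop_true (cs : List Char) (acc : List Char) :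
    cs.foldl pvStepA (acc, true) =
      (acc ++ pvDash (cs.filterMap pvKeep),
       ((cs.filterMap pvKeep).findIdx? PySem.Chars.isdigit).isNone) := by
  induction cs generalizing acc with
  | nil => simp [pvDash]
  | cons c cs ih =>
    by_cases ha : PySem.Chars.isalpha c = true
    · have hnd := pv_alpha_upper_not_digit c ha
      have hdash : ∀ F : List Char, pvDash (PySem.Chars.upperChar c :: F) =
          PySem.Chars.upperChar c :: pvDash F := by
        intro F
        cases hfi : F.findIdx? PySem.Chars.isdigit with
        | none => simp [pvDash, List.findIdx?_cons, hnd, hfi]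
        | some i => simp [pvDash, List.findIdx?_cons, hnd, hfi]
      simp only [List.foldl_cons, pvStepA, ha, if_true, ih, List.filterMap_cons, pvKeep,
        List.findIdx?_cons, hnd, Bool.false_eq_true, if_false, hdash, Prod.mk.injEq,
        List.append_assoc, List.singleton_append, true_and]
      cases (cs.filterMap pvKeep).findIdx? PySem.Chars.isdigit <;> simp
    · by_cases hd : PySem.Chars.isdigit c = true
      · simp only [List.foldl_cons, pvStepA, ha, Bool.false_eq_true, if_false, hd, if_true,
          pv_loop_false, List.filterMap_cons, pvKeep]
        simp [pvDash, List.findIdx?_cons, hd]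
      · simp [pvStepA, pvKeep, ha, hd, ih]

-- ===== VERDICT (by name: the statement is the Claim_ definition above) =====
theorem filtered_text_spec : Claim_equal_filtered_text := by
  intro text _
  unfold Spec_filtered_text filtered_text filtered_text_alt
  rw [pv_loop_true text.toList []]
  simp only [List.nil_append]
  cases hfi : (text.toList.filterMap pvKeep).findIdx? PySem.Chars.isdigit <;>
    simp [pvDash, hfi]
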